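-- pv_equiv track=rewrite | github.com/MrBrantCode/unitest_baseline | mut_generate/mist_train_taco/taco_13013/solution.py | process_tree_operations
-- ===== SOURCE A (Python) =====
-- def process_tree_operations(n, nodes, queries):
--     class BIT:
--         def __init__(self, n):
--             self.n = n
--             self.data = [0] * (n + 1)
--
--         def get_sum(self, i):
--             ret = 0
--             while i > 0:
--                 ret += self.data[i]
--                 i -= i & -i
--             return ret
--
--         def add(self, i, w):
--             if i == 0:
--                 return
--             while i <= self.n:
--                 self.data[i] += w
--                 i += i & -i
--
--     def dfs(u, cnt):
--         cnt += 1
--         l[u] = cnt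
--         for c in tree[u]:
--             cnt = dfs(c, cnt)
--         cnt += 1
--         r[u] = cnt
--         return cnt
--
--     l = [0] * n
--     r = [0] * n
--     tree = [set(children) for _, children in nodes]
--     bit = BIT(dfs(0, 1))
--
--     results = []
--     for query in queries:
--         query_type, v_or_u, w = query
--         if query_type == 1:
--             results.append(bit.get_sum(r[v_or_u] - 1))
--         else:
--             bit.add(l[v_or_u], w)
--             bit.add(r[v_or_u], -w)
--
--     return results
-- ===== SOURCE B (Python) =====
-- def process_tree_operations(n, nodes, queries):
--     # Pure recursive Euler tour returning entry/exit event lists (no in-place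
--     # array threading), arrays filled in two staged passes, and pending type-2
--     # updates kept in a plain list scanned by each type-1 query (no Fenwick tree).
--     children = [cs for _, cs in nodes]
--
--     def tour(u, cnt):
--         cnt += 1
--         lev = [(u, cnt)]
--         rev = []
--         for c in children[u]:
--             cnt, cl, cr = tour(c, cnt)
--             lev += cl
--             rev += cr
--         cnt += 1
--         rev.append((u, cnt))
--         return cnt, lev, rev
--
--     _, lev, rev = tour(0, 1)
--     l = [0] * n
--     r = [0] * n
--     for u, x in lev:
--         l[u] = x
--     for u, x in rev:
--         r[u] = x
--
--     pending = []
--     results = []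
--     for t, v, w in queries:
--         if t == 1:
--             p = r[v] - 1
--             s = 0
--             for lo, hi, w2 in pending:
--                 if lo <= p < hi:
--                     s += w2
--             results.append(s)
--         else:
--             pending.append((l[v], r[v], w))
--     return results
-- ===== Notes on version B (the rewrite author's own statement) =====
-- stated objective: alternative
-- what changed: The in-place-mutating DFS threading l[]/r[] arrays plus a Fenwick/BIT range-update point-query structure is replaced by a pure recursive Euler tour returning entry/exit event lists (arrays filled in two staged passes) and a plain list of pending (l,r,w) updates that each point query scans with a containment test; the set() dedup of children is dropped (Pre_ admits only duplicate-free trees).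
-- outside the precondition, e.g. on process_tree_operations(2, [(0, [1, 1]), (1, [])], [(2, 1, 5), (1, 1, 0)]): A returns [5], B returns [5]
import Mathlib
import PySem

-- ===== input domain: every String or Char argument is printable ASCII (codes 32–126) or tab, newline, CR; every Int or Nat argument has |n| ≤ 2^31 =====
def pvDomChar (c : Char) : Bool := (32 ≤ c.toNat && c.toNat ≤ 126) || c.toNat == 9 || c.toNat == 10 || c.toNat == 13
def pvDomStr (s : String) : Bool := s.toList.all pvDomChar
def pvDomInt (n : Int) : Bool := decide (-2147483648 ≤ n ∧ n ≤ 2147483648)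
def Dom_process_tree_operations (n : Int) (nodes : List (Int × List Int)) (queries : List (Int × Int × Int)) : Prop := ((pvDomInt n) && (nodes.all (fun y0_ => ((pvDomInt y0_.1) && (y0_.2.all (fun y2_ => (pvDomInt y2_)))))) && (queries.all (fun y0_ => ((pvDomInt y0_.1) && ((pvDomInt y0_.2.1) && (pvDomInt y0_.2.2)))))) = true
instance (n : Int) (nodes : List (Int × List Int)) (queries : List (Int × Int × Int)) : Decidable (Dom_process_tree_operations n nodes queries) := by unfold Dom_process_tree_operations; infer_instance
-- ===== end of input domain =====

-- B replaces A's mutating DFS + Fenwick (BIT) structure by a pure recursive Euler tour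
-- returning entry/exit event lists (arrays filled in two staged passes) and a plain list
-- of pending updates scanned at each point query (objective: alternative; not faster).
-- Both programs' tour is recursive; the ports make it total with a fuel parameter
-- (n + len(nodes) + 2) that is never exhausted on the inputs admitted by Pre_.

-- ===== PORT A =====

-- dfs(u, cnt) of A: mutates l, r; returns cnt.  State threaded as (cnt, l, r).
def dfsA (tree : List (List Int)) : Nat → Int → Int → List Int → List Int → Int × List Int × List Int
  | 0, _, cnt, l, r => (cnt, l, r)
  | fuel+1, u, cnt, l, r =>
    let cnt1 := cnt + 1
    let l1 := PySem.List.pySetD l u cnt1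
    let s := ((PySem.List.pyGet? tree u).getD []).foldl
      (fun (acc : Int × List Int × List Int) c => dfsA tree fuel c acc.1 acc.2.1 acc.2.2)
      (cnt1, l1, r)
    (s.1 + 1, s.2.1, PySem.List.pySetD s.2.2 u (s.1 + 1))

-- BIT.get_sum: while i > 0: ret += data[i]; i -= i & -i
def bitGetSumLoop (data : List Int) : Nat → Int → Int → Int
  | 0, _, ret => ret
  | fuel+1, i, ret =>
    if 0 < i then
      bitGetSumLoop data fuel (i - PySem.Int.band i (-i)) (ret + PySem.List.pyGetD data i 0)
    else ret

def bitGetSum (data : List Int) (i : Int) : Int := bitGetSumLoop data i.toNat i 0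

-- BIT.add: if i == 0: return; while i <= n: data[i] += w; i += i & -i
def bitAddLoop (bn w : Int) : Nat → Int → List Int → List Int
  | 0, _, data => data
  | fuel+1, i, data =>
    if i ≤ bn then
      bitAddLoop bn w fuel (i + PySem.Int.band i (-i))
        (PySem.List.pySetD data i (PySem.List.pyGetD data i 0 + w))
    else data

def bitAdd (bn : Int) (data : List Int) (i w : Int) : List Int :=
  if i = 0 then data else bitAddLoop bn w (bn + 1 - i).toNat i data

def process_tree_operations (n : Int) (nodes : List (Int × List Int)) (queries : List (Int × Int × Int)) : List Int :=
  let tree := nodes.map (fun p => PySem.Set.ofList p.2)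
  let d := dfsA tree (n.toNat + nodes.length + 2) 0 1 (List.replicate n.toNat 0) (List.replicate n.toNat 0)
  let m := d.1
  let l := d.2.1
  let r := d.2.2
  (queries.foldl
    (fun (acc : List Int × List Int) q =>
      if q.1 = 1 then
        (acc.1, acc.2 ++ [bitGetSum acc.1 (PySem.List.pyGetD r q.2.1 0 - 1)])
      else
        (bitAdd m (bitAdd m acc.1 (PySem.List.pyGetD l q.2.1 0) q.2.2)
           (PySem.List.pyGetD r q.2.1 0) (-q.2.2), acc.2))
    (List.replicate (m + 1).toNat 0, [])).2

-- ===== PORT B =====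

-- tour(u, cnt) of B: pure recursion, returns (cnt, entry events lev, exit events rev).
def tourE (children : List (List Int)) : Nat → Int → Int → Int × List (Int × Int) × List (Int × Int)
  | 0, _, cnt => (cnt, [], [])
  | fuel+1, u, cnt =>
    let s := ((PySem.List.pyGet? children u).getD []).foldl
      (fun (acc : Int × List (Int × Int) × List (Int × Int)) c =>
        let t := tourE children fuel c acc.1
        (t.1, acc.2.1 ++ t.2.1, acc.2.2 ++ t.2.2))
      (cnt + 1, [(u, cnt + 1)], [])
    (s.1 + 1, s.2.1, s.2.2 ++ [(u, s.1 + 1)])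

-- for u, x in ev: arr[u] = x
def applyEv (xs : List Int) (ev : List (Int × Int)) : List Int :=
  ev.foldl (fun acc e => PySem.List.pySetD acc e.1 e.2) xs

-- s = 0; for lo, hi, w2 in pending: if lo <= p < hi: s += w2
def sumUpdates (updates : List (Int × Int × Int)) (p : Int) : Int :=
  updates.foldl (fun s u => if u.1 ≤ p ∧ p < u.2.1 then s + u.2.2 else s) 0

def process_tree_operations_alt (n : Int) (nodes : List (Int × List Int)) (queries : List (Int × Int × Int)) : List Int :=
  let children := nodes.map (fun p => p.2)
  let e := tourE children (n.toNat + nodes.length + 2) 0 1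
  let l := applyEv (List.replicate n.toNat 0) e.2.1
  let r := applyEv (List.replicate n.toNat 0) e.2.2
  (queries.foldl
    (fun (acc : List (Int × Int × Int) × List Int) q =>
      if q.1 = 1 then
        (acc.1, acc.2 ++ [sumUpdates acc.1 (PySem.List.pyGetD r q.2.1 0 - 1)])
      else
        (acc.1 ++ [(PySem.List.pyGetD l q.2.1 0, PySem.List.pyGetD r q.2.1 0, q.2.2)], acc.2))
    ([], [])).2

-- ===== PRECONDITION & SPEC =====
-- Pre_ admits the inputs on which the tour from node 0 is a clean tree walk: every
-- queried vertex a valid (possibly negative, Python-style) index, and either node 0 is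
-- childless (the walk touches no other node, whatever the rest of the input holds) or
-- the nodes form a well-formed rooted tree (child indices in [1, n) with n ≤ len(nodes),
-- no index occurring twice as a child).  Outside this A raises (IndexError /
-- RecursionError) or — when a vertex occurs twice as a child — A's answer can depend on
-- Python's hash-based set iteration order, a corner no one would specify.
def Pre_process_tree_operations (n : Int) (nodes : List (Int × List Int)) (queries : List (Int × Int × Int)) : Prop :=
  1 ≤ n ∧ nodes ≠ [] ∧
  (∀ q ∈ queries, -n ≤ q.2.1 ∧ q.2.1 < n) ∧
  (nodes.headI.2 = [] ∨
    (n ≤ (nodes.length : Int) ∧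
     (∀ p ∈ nodes, ∀ c ∈ p.2, 1 ≤ c ∧ c < n) ∧
     (nodes.flatMap (fun p => p.2)).Nodup))
instance (n : Int) (nodes : List (Int × List Int)) (queries : List (Int × Int × Int)) : Decidable (Pre_process_tree_operations n nodes queries) := by unfold Pre_process_tree_operations; infer_instance

def pvWitness_process_tree_operations : Int × (List (Int × List Int)) × (List (Int × Int × Int)) :=
  (3, [(0, [1]), (1, [2]), (2, [])], [(2, 1, 5), (1, 2, 0), (1, 0, 0), (2, 0, -2), (1, -1, 7)])

def Spec_process_tree_operations (n : Int) (nodes : List (Int × List Int)) (queries : List (Int × Int × Int)) (out : List Int) : Prop := out = process_tree_operations_alt n nodes queries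
instance (n : Int) (nodes : List (Int × List Int)) (queries : List (Int × Int × Int)) (out : List Int) : Decidable (Spec_process_tree_operations n nodes queries out) := by unfold Spec_process_tree_operations; infer_instance

-- ===== CLAIM (what is proved, stated in full; the proofs are below) =====
def Claim_equal_process_tree_operations : Prop := ∀ (n : Int) (nodes : List (Int × List Int)) (queries : List (Int × Int × Int)), Dom_process_tree_operations n nodes queries → Pre_process_tree_operations n nodes queries → Spec_process_tree_operations n nodes queries (process_tree_operations n nodes queries)

-- ===== LEMMAS AND PROOFS =====

def pvLow (n : Nat) : Nat :=
  if h : n = 0 then 0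
  else if n % 2 = 1 then 1
  else 2 * pvLow (n / 2)
decreasing_by omega

theorem pvLow_even (n : Nat) (h : n % 2 = 0) : pvLow n = 2 * pvLow (n / 2) := by
  by_cases h0 : n = 0
  · subst h0; simp [pvLow]
  · rw [pvLow]; simp [h0, h]

theorem pvLow_odd (n : Nat) (h : n % 2 = 1) : pvLow n = 1 := by
  rw [pvLow]; simp [h]; omega

theorem pvLow_odd_mul_pow (s c : Nat) : pvLow ((2*s+1) * 2^c) = 2^c := by
  induction c with
  | zero => simpa using pvLow_odd (2*s+1) (by omega)
  | succ c ih =>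
    have he : (2*s+1) * 2^(c+1) = 2 * ((2*s+1) * 2^c) := by ring
    rw [he, pvLow_even _ (by omega), Nat.mul_div_cancel_left _ (by norm_num), ih]
    ring

theorem pv_decomp (n : Nat) (h : n ≠ 0) : ∃ s c, n = (2*s+1) * 2^c := by
  obtain ⟨k, m, hm, he⟩ := Nat.exists_eq_two_pow_mul_odd h
  obtain ⟨s, hs⟩ := hm
  exact ⟨s, k, by rw [he, hs]; ring⟩

theorem pvLow_pos (n : Nat) (h : n ≠ 0) : 0 < pvLow n := by
  obtain ⟨s, c, rfl⟩ := pv_decomp n h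
  rw [pvLow_odd_mul_pow]; positivity

theorem pvLow_le (n : Nat) (h : n ≠ 0) : pvLow n ≤ n := by
  obtain ⟨s, c, rfl⟩ := pv_decomp n h
  rw [pvLow_odd_mul_pow]
  exact Nat.le_mul_of_pos_left _ (by omega)

theorem pv_land_step (n m : Nat) (hn : n ≠ 0) (hm : m ≠ 0) :
    n &&& m = 2 * ((n/2) &&& (m/2)) + (if n % 2 = 1 ∧ m % 2 = 1 then 1 else 0) := by
  show Nat.bitwise and n m = 2 * Nat.bitwise and (n/2) (m/2) + _
  rw [Nat.bitwise]
  simp [hn, hm]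
  split_ifs <;> simp_all <;> omega

theorem pv_land_lowbit (n : Nat) (h : n ≠ 0) : n - (n &&& (n-1)) = pvLow n := by
  induction n using Nat.strong_induction_on with
  | _ n ih =>
  rcases Nat.even_or_odd n with he | ho
  · -- even
    obtain ⟨k, rfl⟩ : ∃ k, n = 2 * k := ⟨n/2, by obtain ⟨j, hj⟩ := he; omega⟩
    have hk : k ≠ 0 := by omega
    have h1 : 2*k - 1 ≠ 0 := by omega
    rw [pv_land_step _ _ h h1]
    have e1 : 2*k/2 = k := by omega
    have e2 : (2*k-1)/2 = k - 1 := by omega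
    rw [e1, e2]
    have : ¬ (2*k % 2 = 1 ∧ (2*k-1) % 2 = 1) := by omega
    rw [if_neg this]
    have hle : k &&& (k-1) ≤ k := Nat.and_le_left
    have ihk := ih k (by omega) hk
    rw [pvLow_even _ (by omega), e1]
    omega
  · obtain ⟨k, rfl⟩ : ∃ k, n = 2 * k + 1 := ⟨n/2, by obtain ⟨j, hj⟩ := ho; omega⟩
    rw [pvLow_odd _ (by omega)]
    by_cases hk : k = 0
    · subst hk; decide
    · have h1 : 2*k+1-1 ≠ 0 := by omega
      rw [pv_land_step _ _ h h1]
      have e1 : (2*k+1)/2 = k := by omega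
      have e2 : (2*k+1-1)/2 = k := by omega
      rw [e1, e2, Nat.and_self]
      have : ¬ ((2*k+1) % 2 = 1 ∧ (2*k+1-1) % 2 = 1) := by omega
      rw [if_neg this]
      omega

theorem pv_band_lowbit (i : Int) (h : 0 < i) :
    PySem.Int.band i (-i) = (pvLow i.toNat : Int) := by
  unfold PySem.Int.band
  rw [if_pos (by omega), if_neg (by omega)]
  have e1 : (-(-i) - 1).toNat = i.toNat - 1 := by omega
  rw [e1, pv_land_lowbit i.toNat (by omega)]

def pvDown (p : Nat) : List Nat :=
  if h : p = 0 then [] else p :: pvDown (p - pvLow p)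
decreasing_by have := pvLow_pos p h; omega

def pvUp (m i : Nat) : List Nat :=
  if h : 1 ≤ i ∧ i ≤ m then i :: pvUp m (i + pvLow i) else []
termination_by m + 1 - i
decreasing_by have := pvLow_pos i (by omega); omega

theorem pvDown_mem_le (p : Nat) : ∀ j ∈ pvDown p, 1 ≤ j ∧ j ≤ p := by
  induction p using Nat.strong_induction_on with
  | _ p ih =>
  intro j hj
  rw [pvDown] at hj
  by_cases h0 : p = 0
  · simp [h0] at hj
  · simp [h0] at hj
    rcases hj with rfl | hj
    · omega
    · have hlp := pvLow_pos p h0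
      have := ih (p - pvLow p) (by omega) j hj
      omega

-- pvLow of a sum: the low block of the smaller summand wins
theorem pvLow_add (b y d : Nat) (hd : 0 < d) (hlt : d < 2^b) :
    pvLow (2^b * y + d) = pvLow d := by
  induction b generalizing y d with
  | zero => omega
  | succ b ih =>
    rcases Nat.even_or_odd d with he | ho
    · obtain ⟨d', rfl⟩ : ∃ x, d = 2 * x := ⟨d/2, by obtain ⟨j,hj⟩ := he; omega⟩
      have e : 2^(b+1) * y + 2*d' = 2 * (2^b * y + d') := by ring
      rw [e, pvLow_even _ (by omega), Nat.mul_div_cancel_left _ (by norm_num),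
        ih y d' (by omega) (by rw [pow_succ] at hlt; omega),
        pvLow_even (2*d') (by omega), Nat.mul_div_cancel_left _ (by norm_num)]
    · obtain ⟨d', rfl⟩ := ho
      have : (2^(b+1) * y + (2*d'+1)) % 2 = 1 := by
        have : 2^(b+1) * y = 2 * (2^b * y) := by ring
        omega
      rw [pvLow_odd _ this, pvLow_odd _ (by omega)]

-- d + low d stays within the aligned block
theorem pvLow_add_le_pow (b d : Nat) (hd : 0 < d) (hlt : d < 2^b) :
    d + pvLow d ≤ 2^b := by
  obtain ⟨s, c, rfl⟩ := pv_decomp d (by omega)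
  rw [pvLow_odd_mul_pow]
  have hcb : c < b := by
    by_contra hcb
    have : 2^b ≤ 2^c := Nat.pow_le_pow_right (by norm_num) (by omega)
    nlinarith
  have h1 : 2*s+1 < 2^(b-c) := by
    have h2 : (2*s+1) * 2^c < 2^(b-c) * 2^c := by
      rw [← pow_add]; have : b - c + c = b := by omega
      rw [this]; exact hlt
    exact lt_of_mul_lt_mul_right h2 (by positivity)
  have h2 : 2*s+2 ≤ 2^(b-c) := by
    have : 2^(b-c) % 2 = 0 := by
      obtain ⟨e, he⟩ : ∃ e, b - c = e + 1 := ⟨b-c-1, by omega⟩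
      rw [he, pow_succ]; omega
    omega
  calc (2*s+1) * 2^c + 2^c = (2*s+2) * 2^c := by ring
    _ ≤ 2^(b-c) * 2^c := by exact Nat.mul_le_mul_right _ h2
    _ = 2^b := by rw [← pow_add]; congr 1; omega

-- low strictly grows along the up path
theorem pvLow_add_low (i : Nat) (hi : 0 < i) : 2 * pvLow i ≤ pvLow (i + pvLow i) := by
  obtain ⟨s, c, rfl⟩ := pv_decomp i (by omega)
  rw [pvLow_odd_mul_pow]
  have e : (2*s+1) * 2^c + 2^c = 2^(c+1) * (s+1) := by ring
  rw [e]
  obtain ⟨s', c', he⟩ := pv_decomp (s+1) (by omega)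
  rw [he, ← mul_assoc, show 2^(c+1) * (2*s'+1) = (2*s'+1) * 2^(c+1) by ring, mul_assoc, ← pow_add,
    pvLow_odd_mul_pow]
  have : 2^(c+1) ≤ 2^(c+1+c') := Nat.pow_le_pow_right (by norm_num) (by omega)
  calc 2 * 2^c = 2^(c+1) := by ring
    _ ≤ _ := this

theorem pvUp_mem_ge (m : Nat) : ∀ i, ∀ j ∈ pvUp m i, i ≤ j := by
  intro i
  induction i using pvUp.induct m with
  | case1 i h ih =>
    intro j hj
    rw [pvUp, dif_pos h] at hj
    rcases List.mem_cons.mp hj with rfl | hj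
    · omega
    · have hli := pvLow_pos i (by omega)
      have := ih j hj
      omega
  | case2 i h => intro j hj; rw [pvUp, dif_neg h] at hj; simp at hj

theorem pvUp_fwd (m : Nat) : ∀ i, 1 ≤ i → ∀ j ∈ pvUp m i,
    i ≤ j ∧ j ≤ m ∧ j - pvLow j < i ∧ pvLow i ≤ pvLow j := by
  intro i
  induction i using pvUp.induct m with
  | case2 i h => intro _ j hj; rw [pvUp, dif_neg h] at hj; simp at hj
  | case1 i h ih =>
    intro hi j hj
    rw [pvUp, dif_pos h] at hj
    have hli := pvLow_pos i (by omega)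
    rcases List.mem_cons.mp hj with rfl | hj
    · omega
    · have hii : 1 ≤ i + pvLow i := by omega
      obtain ⟨h1, h2, h3, h4⟩ := ih hii j hj
      have hji : i ≤ j := by omega
      have hlow2 : 2 * pvLow i ≤ pvLow j :=
        le_trans (pvLow_add_low i (by omega)) h4
      refine ⟨hji, h2, ?_, by omega⟩
      -- show j - pvLow j < i
      by_contra hcon
      push_neg at hcon
      obtain ⟨s, c, hi_eq⟩ := pv_decomp i (by omega)
      have hlowi : pvLow i = 2^c := by rw [hi_eq, pvLow_odd_mul_pow]
      obtain ⟨t, b, hj_eq⟩ := pv_decomp j (by omega)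
      have hlowj : pvLow j = 2^b := by rw [hj_eq, pvLow_odd_mul_pow]
      have hcb : c + 1 ≤ b := by
        have : 2^(c+1) ≤ 2^b := by
          rw [← hlowj]; calc 2^(c+1) = 2 * 2^c := by ring
            _ ≤ pvLow j := by rw [← hlowi]; exact hlow2
        exact (Nat.pow_le_pow_iff_right (by norm_num)).mp this
      -- j - pvLow j = 2 * 2^c * q
      have hjl : j - pvLow j = 2 * 2^c * (t * 2^(b - c)) := by
        rw [hlowj, hj_eq]
        have e0 : (2*t+1) * 2^b = 2*t*2^b + 2^b := by ring
        have e2 : 2*t*2^b = 2 * 2^c * (t * 2^(b-c)) := by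
          have hb : b = c + (b-c) := by omega
          calc 2*t*2^b = 2*t*2^(c+(b-c)) := by rw [← hb]
            _ = 2 * 2^c * (t * 2^(b-c)) := by rw [pow_add]; ring
        omega
      set E := 2^c with hE
      have hEpos : 0 < E := by positivity
      set q := t * 2^(b-c)
      have hieq2 : i = 2*E*s + E := by rw [hi_eq]; ring
      have hlt : j - pvLow j < i + E := by rw [hlowi] at h3; omega
      by_cases hqs : q ≤ s
      · have : 2*E*q ≤ 2*E*s := Nat.mul_le_mul_left _ hqs
        omega
      · have : 2*E*(s+1) ≤ 2*E*q := Nat.mul_le_mul_left _ (by omega)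
        have he : 2*E*(s+1) = 2*E*s + 2*E := by ring
        omega

theorem pvUp_bwd (m : Nat) : ∀ i, ∀ j, 1 ≤ i → i ≤ j → j ≤ m → j - pvLow j < i → j ∈ pvUp m i := by
  intro i
  induction i using pvUp.induct m with
  | case2 i h =>
    intro j h1 h2 h3 _
    exact absurd ⟨h1, le_trans h2 h3⟩ h
  | case1 i h ih =>
    intro j h1 h2 h3 h4
    rw [pvUp, dif_pos h]
    rcases eq_or_lt_of_le h2 with rfl | hlt
    · exact List.mem_cons_self
    · refine List.mem_cons_of_mem _ (ih j (by have := pvLow_pos i (by omega); omega) ?_ h3 (by have := pvLow_pos i (by omega); omega))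
      -- i + pvLow i ≤ j
      obtain ⟨t, b, hj_eq⟩ := pv_decomp j (by omega)
      have hlowj : pvLow j = 2^b := by rw [hj_eq, pvLow_odd_mul_pow]
      have hjl : j - pvLow j = 2^b * (2*t) := by
        rw [hlowj, hj_eq]
        have : (2*t+1) * 2^b = 2^b * (2*t) + 2^b := by ring
        omega
      have hbpos : 0 < 2^b := by positivity
      set d := i - 2^b * (2*t) with hd
      have hd0 : 0 < d := by omega
      have hdlt : d < 2^b := by
        have : j = 2^b * (2*t) + 2^b := by rw [hj_eq]; ring
        omega
      have hlowi : pvLow i = pvLow d := by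
        have : i = 2^b * (2*t) + d := by omega
        rw [this]; exact pvLow_add b (2*t) d hd0 hdlt
      have hcl : d + pvLow d ≤ 2^b := pvLow_add_le_pow b d hd0 hdlt
      have : j = 2^b * (2*t) + 2^b := by rw [hj_eq]; ring
      omega

theorem pvDown_sum (w : Int) (a : Nat) (ha : 1 ≤ a) : ∀ p : Nat,
    ((pvDown p).map (fun j => if j - pvLow j < a ∧ a ≤ j then w else 0)).sum
      = if a ≤ p then w else 0 := by
  intro p
  induction p using Nat.strong_induction_on with
  | _ p ih =>
  by_cases h0 : p = 0
  · subst h0; rw [pvDown]; simp; omega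
  · have hlp := pvLow_pos p h0
    have hle := pvLow_le p h0
    rw [pvDown, dif_neg h0]
    simp only [List.map_cons, List.sum_cons]
    rw [ih (p - pvLow p) (by omega)]
    by_cases h1 : a ≤ p - pvLow p
    · rw [if_pos h1, if_neg (by omega), if_pos (by omega)]; ring
    · by_cases h2 : a ≤ p
      · rw [if_neg h1, if_pos (by omega), if_pos h2]; ring
      · rw [if_neg h1, if_neg (by omega), if_neg h2]; ring

theorem pvIdx_lt (n : Nat) (i : Int) (q : Nat) (h : PySem.List.pyIdx? n i = some q) : q < n := by
  unfold PySem.List.pyIdx? at h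
  split_ifs at h <;> simp_all <;> omega

theorem pySetD_getD (xs : List Int) (u v : Int) (p : Nat) :
    (PySem.List.pySetD xs u v).getD p 0 =
      if PySem.List.pyIdx? xs.length u = some p then v else xs.getD p 0 := by
  unfold PySem.List.pySetD PySem.List.pySet?
  cases h : PySem.List.pyIdx? xs.length u with
  | none => simp [h]
  | some q =>
    have hq := pvIdx_lt _ _ _ h
    simp only [h, Option.map_some, Option.getD_some]
    rw [List.getD_eq_getElem?_getD, List.getElem?_set, List.getD_eq_getElem?_getD]
    by_cases hpq : q = p
    · subst hpq; simp [hq]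
    · simp [hpq]

theorem pyGetD_cell (xs : List Int) (u : Int) :
    PySem.List.pyGetD xs u 0 =
      (match PySem.List.pyIdx? xs.length u with
       | some q => xs.getD q 0
       | none => 0) := by
  unfold PySem.List.pyGetD PySem.List.pyGet?
  cases h : PySem.List.pyIdx? xs.length u with
  | none => simp
  | some q => simp [List.getD_eq_getElem?_getD]

theorem pyGetD_nonneg_getD (xs : List Int) (i : Int) (hi : 0 ≤ i) :
    PySem.List.pyGetD xs i 0 = xs.getD i.toNat 0 := by
  rw [pyGetD_cell]
  unfold PySem.List.pyIdx?
  rw [if_pos hi]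
  by_cases h : i < (xs.length : Int)
  · simp [h]
  · rw [if_neg h]
    rw [List.getD_eq_getElem?_getD, List.getElem?_eq_none (by omega)]
    rfl

theorem pyGetD_cell_none (xs : List Int) (u : Int)
    (h : PySem.List.pyIdx? xs.length u = none) : PySem.List.pyGetD xs u 0 = 0 := by
  rw [pyGetD_cell, h]

theorem pyGetD_cell_some (xs : List Int) (u : Int) (q : Nat)
    (h : PySem.List.pyIdx? xs.length u = some q) :
    PySem.List.pyGetD xs u 0 = xs.getD q 0 := by
  rw [pyGetD_cell, h]

def pvGsum (data : List Int) (p : Nat) : Int :=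
  ((pvDown p).map (fun j => data.getD j 0)).sum

theorem pv_sum_map_add (l : List Nat) (f g : Nat → Int) :
    (l.map (fun j => f j + g j)).sum = (l.map f).sum + (l.map g).sum := by
  induction l with
  | nil => simp
  | cons x t ih => simp [ih]; ring

theorem pv_sum_map_zero (l : List Nat) (f : Nat → Int) (h : ∀ j ∈ l, f j = 0) :
    (l.map f).sum = 0 := by
  induction l with
  | nil => simp
  | cons x t ih => simp [h x (by simp), ih (fun j hj => h j (by simp [hj]))]

theorem bitGetSumLoop_eq (data : List Int) :
    ∀ fuel (i : Int) ret, i.toNat ≤ fuel →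
      bitGetSumLoop data fuel i ret = ret + pvGsum data i.toNat := by
  intro fuel
  induction fuel with
  | zero =>
    intro i ret h
    have : i.toNat = 0 := by omega
    rw [this]
    simp [bitGetSumLoop, pvGsum, pvDown]
  | succ fuel ih =>
    intro i ret h
    simp only [bitGetSumLoop]
    by_cases hi : 0 < i
    · rw [if_pos hi, pv_band_lowbit i hi]
      have h0 : i.toNat ≠ 0 := by omega
      have hlp := pvLow_pos i.toNat h0
      have hle := pvLow_le i.toNat h0
      have e1 : (i - (pvLow i.toNat : Int)).toNat = i.toNat - pvLow i.toNat := by omega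
      rw [ih _ _ (by omega), e1]
      rw [pyGetD_nonneg_getD data i (by omega)]
      have : pvGsum data i.toNat
          = data.getD i.toNat 0 + pvGsum data (i.toNat - pvLow i.toNat) := by
        unfold pvGsum
        rw [pvDown, dif_neg h0]
        simp
      rw [this]; ring
    · rw [if_neg hi]
      have : i.toNat = 0 := by omega
      rw [this]
      simp [pvGsum, pvDown]

theorem bitAddLoop_spec (bn w : Int) (hbn : 0 ≤ bn) :
    ∀ fuel (i : Int) (data : List Int), 1 ≤ i → (bn + 1 - i).toNat ≤ fuel →
      data.length = bn.toNat + 1 →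
      (bitAddLoop bn w fuel i data).length = data.length ∧
      ∀ p : Nat, (bitAddLoop bn w fuel i data).getD p 0 =
        data.getD p 0 + (if p ∈ pvUp bn.toNat i.toNat then w else 0) := by
  intro fuel
  induction fuel with
  | zero =>
    intro i data hi hf _
    have hup : pvUp bn.toNat i.toNat = [] := by
      rw [pvUp, dif_neg (by omega)]
    simp [bitAddLoop, hup]
  | succ fuel ih =>
    intro i data hi hf hlen
    simp only [bitAddLoop]
    by_cases h : i ≤ bn
    · rw [if_pos h, pv_band_lowbit i (by omega)]
      have h0 : i.toNat ≠ 0 := by omega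
      have hlp := pvLow_pos i.toNat h0
      have hle := pvLow_le i.toNat h0
      set data1 := PySem.List.pySetD data i (PySem.List.pyGetD data i 0 + w) with hd1
      have hlen1 : data1.length = bn.toNat + 1 := by
        rw [hd1, PySem.List.length_pySetD, hlen]
      have e1 : (i + (pvLow i.toNat : Int)).toNat = i.toNat + pvLow i.toNat := by omega
      obtain ⟨hl2, hg2⟩ := ih (i + (pvLow i.toNat : Int)) data1 (by omega) (by omega) hlen1
      constructor
      · rw [hl2, hlen1, hlen]
      · intro p
        rw [hg2 p, e1]
        have hup : pvUp bn.toNat i.toNat = i.toNat :: pvUp bn.toNat (i.toNat + pvLow i.toNat) := by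
          rw [pvUp, dif_pos ⟨by omega, by omega⟩]
        rw [hup]
        have hidx : PySem.List.pyIdx? data.length i = some i.toNat := by
          unfold PySem.List.pyIdx?
          rw [if_pos (by omega), if_pos (by rw [hlen]; omega)]
        have hset := pySetD_getD data i (PySem.List.pyGetD data i 0 + w) p
        rw [hidx] at hset
        have hnotmem : i.toNat ∉ pvUp bn.toNat (i.toNat + pvLow i.toNat) := by
          intro hmem
          have := pvUp_mem_ge bn.toNat _ _ hmem
          omega
        by_cases hp : p = i.toNat
        · subst hp
          rw [hd1] at *
          rw [hset, if_pos rfl, if_neg hnotmem, if_pos List.mem_cons_self]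
          rw [pyGetD_nonneg_getD data i (by omega)]
          ring
        · rw [hd1] at *
          rw [hset, if_neg (by simp [hp]; omega)]
          have hiff : (p ∈ i.toNat :: pvUp bn.toNat (i.toNat + pvLow i.toNat))
               ↔ (p ∈ pvUp bn.toNat (i.toNat + pvLow i.toNat)) := by
            simp [List.mem_cons, hp]
          rw [if_congr hiff rfl rfl]
    · rw [if_neg h]
      have hup : pvUp bn.toNat i.toNat = [] := by
        rw [pvUp, dif_neg (by omega)]
      simp [hup]

theorem bitAdd_spec (bn : Int) (data : List Int) (i w : Int) (hbn : 1 ≤ bn)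
    (hi : 0 ≤ i) (him : i ≤ bn) (hlen : data.length = bn.toNat + 1) :
    (bitAdd bn data i w).length = data.length ∧
    ∀ p : Nat, (bitAdd bn data i w).getD p 0 =
      data.getD p 0 + (if 1 ≤ i ∧ p ∈ pvUp bn.toNat i.toNat then w else 0) := by
  unfold bitAdd
  by_cases h0 : i = 0
  · subst h0
    simp
  · rw [if_neg h0]
    obtain ⟨h1, h2⟩ := bitAddLoop_spec bn w (by omega) (bn + 1 - i).toNat i data (by omega) le_rfl hlen
    refine ⟨h1, fun p => ?_⟩
    rw [h2 p]
    have : (1 ≤ i ∧ p ∈ pvUp bn.toNat i.toNat) ↔ p ∈ pvUp bn.toNat i.toNat := by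
      constructor
      · exact fun h => h.2
      · exact fun h => ⟨by omega, h⟩
    rw [if_congr this rfl rfl]

theorem pvGsum_add (bn : Int) (data : List Int) (i w : Int) (hbn : 1 ≤ bn)
    (hi : 0 ≤ i) (him : i ≤ bn) (hlen : data.length = bn.toNat + 1)
    (p : Nat) (hp : p ≤ bn.toNat) :
    pvGsum (bitAdd bn data i w) p = pvGsum data p + (if 1 ≤ i ∧ i ≤ (p:Int) then w else 0) := by
  obtain ⟨hl, hg⟩ := bitAdd_spec bn data i w hbn hi him hlen
  unfold pvGsum
  rw [List.map_congr_left (fun j _ => hg j)]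
  rw [pv_sum_map_add]
  congr 1
  by_cases h1 : 1 ≤ i
  · have h0 : i.toNat ≠ 0 := by omega
    have heq : ∀ j ∈ pvDown p,
        (if 1 ≤ i ∧ j ∈ pvUp bn.toNat i.toNat then w else 0)
          = (if j - pvLow j < i.toNat ∧ i.toNat ≤ j then w else 0) := by
      intro j hj
      obtain ⟨hj1, hj2⟩ := pvDown_mem_le p j hj
      by_cases hm : j ∈ pvUp bn.toNat i.toNat
      · obtain ⟨ha, hb, hc, _⟩ := pvUp_fwd bn.toNat i.toNat (by omega) j hm
        rw [if_pos ⟨h1, hm⟩, if_pos ⟨hc, ha⟩]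
      · rw [if_neg (by tauto)]
        by_cases hcond : j - pvLow j < i.toNat ∧ i.toNat ≤ j
        · exact absurd (pvUp_bwd bn.toNat i.toNat j (by omega) hcond.2 (by omega) hcond.1) hm
        · rw [if_neg hcond]
    rw [List.map_congr_left heq, pvDown_sum w i.toNat (by omega) p]
    have : (i.toNat ≤ p) ↔ (1 ≤ i ∧ i ≤ (p:Int)) := by omega
    split_ifs with hA hB hB
    · rfl
    · exact absurd (this.mp hA) hB
    · exact absurd (this.mpr hB) hA
    · rfl
  · rw [if_neg (by tauto)]
    rw [pv_sum_map_zero _ _ (fun j _ => by rw [if_neg (by tauto)])]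

theorem applyEv_append (xs : List Int) (a b : List (Int × Int)) :
    applyEv xs (a ++ b) = applyEv (applyEv xs a) b := by
  unfold applyEv; rw [List.foldl_append]

-- A's mutating DFS equals B's event-list tour followed by event application.
theorem dfsA_events (t : List (List Int)) :
    ∀ (fuel : Nat) (u cnt : Int) (l r : List Int),
      dfsA t fuel u cnt l r =
        ((tourE t fuel u cnt).1, applyEv l (tourE t fuel u cnt).2.1,
          applyEv r (tourE t fuel u cnt).2.2) := by
  intro fuel
  induction fuel with
  | zero => intro u cnt l r; rfl
  | succ fuel ih =>
    intro u cnt l r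
    have fold : ∀ (cs : List Int) (cnt0 : Int) (lev rev : List (Int × Int)),
        cs.foldl (fun (acc : Int × List Int × List Int) c =>
            dfsA t fuel c acc.1 acc.2.1 acc.2.2) (cnt0, applyEv l lev, applyEv r rev)
          = ((cs.foldl (fun (acc : Int × List (Int × Int) × List (Int × Int)) c =>
                let tt := tourE t fuel c acc.1
                (tt.1, acc.2.1 ++ tt.2.1, acc.2.2 ++ tt.2.2)) (cnt0, lev, rev)).1,
             applyEv l (cs.foldl (fun (acc : Int × List (Int × Int) × List (Int × Int)) c =>
                let tt := tourE t fuel c acc.1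
                (tt.1, acc.2.1 ++ tt.2.1, acc.2.2 ++ tt.2.2)) (cnt0, lev, rev)).2.1,
             applyEv r (cs.foldl (fun (acc : Int × List (Int × Int) × List (Int × Int)) c =>
                let tt := tourE t fuel c acc.1
                (tt.1, acc.2.1 ++ tt.2.1, acc.2.2 ++ tt.2.2)) (cnt0, lev, rev)).2.2) := by
      intro cs
      induction cs with
      | nil => intro cnt0 lev rev; rfl
      | cons c cs ihc =>
        intro cnt0 lev rev
        simp only [List.foldl_cons]
        rw [ih c cnt0 (applyEv l lev) (applyEv r rev),
          ← applyEv_append l lev (tourE t fuel c cnt0).2.1,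
          ← applyEv_append r rev (tourE t fuel c cnt0).2.2]
        exact ihc (tourE t fuel c cnt0).1 (lev ++ (tourE t fuel c cnt0).2.1)
          (rev ++ (tourE t fuel c cnt0).2.2)
    simp only [dfsA, tourE]
    have hl1 : PySem.List.pySetD l u (cnt + 1) = applyEv l [(u, cnt + 1)] := rfl
    have hr0 : r = applyEv r ([] : List (Int × Int)) := rfl
    conv_lhs => rw [hl1, hr0]
    rw [fold ((PySem.List.pyGet? t u).getD []) (cnt + 1) [(u, cnt + 1)] []]
    rw [applyEv_append]
    rfl

-- per-cell dichotomy produced by A's DFS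
theorem dfsA_inv (t : List (List Int)) :
    ∀ (fuel : Nat) (u cnt : Int) (l r : List Int), 1 ≤ cnt → l.length = r.length →
      cnt ≤ (dfsA t fuel u cnt l r).1 ∧
      (dfsA t fuel u cnt l r).2.1.length = l.length ∧
      (dfsA t fuel u cnt l r).2.2.length = r.length ∧
      ∀ p : Nat,
        ((dfsA t fuel u cnt l r).2.1.getD p 0 = l.getD p 0 ∧
         (dfsA t fuel u cnt l r).2.2.getD p 0 = r.getD p 0) ∨
        (2 ≤ (dfsA t fuel u cnt l r).2.1.getD p 0 ∧
         (dfsA t fuel u cnt l r).2.1.getD p 0 < (dfsA t fuel u cnt l r).2.2.getD p 0 ∧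
         (dfsA t fuel u cnt l r).2.2.getD p 0 ≤ (dfsA t fuel u cnt l r).1) := by
  intro fuel
  induction fuel with
  | zero => intro u cnt l r h _; exact ⟨le_refl _, rfl, rfl, fun p => Or.inl ⟨rfl, rfl⟩⟩
  | succ fuel ih =>
    intro u cnt l r hcnt hlen
    have fold : ∀ (cs : List Int) (cnt0 : Int) (l0 r0 : List Int), 1 ≤ cnt0 → l0.length = r0.length →
        (cnt0 ≤ (cs.foldl (fun (acc : Int × List Int × List Int) c =>
            dfsA t fuel c acc.1 acc.2.1 acc.2.2) (cnt0, l0, r0)).1 ∧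
         (cs.foldl (fun (acc : Int × List Int × List Int) c =>
            dfsA t fuel c acc.1 acc.2.1 acc.2.2) (cnt0, l0, r0)).2.1.length = l0.length ∧
         (cs.foldl (fun (acc : Int × List Int × List Int) c =>
            dfsA t fuel c acc.1 acc.2.1 acc.2.2) (cnt0, l0, r0)).2.2.length = r0.length ∧
         ∀ p : Nat,
           ((cs.foldl (fun (acc : Int × List Int × List Int) c =>
               dfsA t fuel c acc.1 acc.2.1 acc.2.2) (cnt0, l0, r0)).2.1.getD p 0 = l0.getD p 0 ∧
            (cs.foldl (fun (acc : Int × List Int × List Int) c =>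
               dfsA t fuel c acc.1 acc.2.1 acc.2.2) (cnt0, l0, r0)).2.2.getD p 0 = r0.getD p 0) ∨
           (2 ≤ (cs.foldl (fun (acc : Int × List Int × List Int) c =>
               dfsA t fuel c acc.1 acc.2.1 acc.2.2) (cnt0, l0, r0)).2.1.getD p 0 ∧
            (cs.foldl (fun (acc : Int × List Int × List Int) c =>
               dfsA t fuel c acc.1 acc.2.1 acc.2.2) (cnt0, l0, r0)).2.1.getD p 0 <
            (cs.foldl (fun (acc : Int × List Int × List Int) c =>
               dfsA t fuel c acc.1 acc.2.1 acc.2.2) (cnt0, l0, r0)).2.2.getD p 0 ∧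
            (cs.foldl (fun (acc : Int × List Int × List Int) c =>
               dfsA t fuel c acc.1 acc.2.1 acc.2.2) (cnt0, l0, r0)).2.2.getD p 0 ≤
            (cs.foldl (fun (acc : Int × List Int × List Int) c =>
               dfsA t fuel c acc.1 acc.2.1 acc.2.2) (cnt0, l0, r0)).1)) := by
      intro cs
      induction cs with
      | nil => intro cnt0 l0 r0 h _; exact ⟨le_refl _, rfl, rfl, fun p => Or.inl ⟨rfl, rfl⟩⟩
      | cons c cs ihc =>
        intro cnt0 l0 r0 h0 hl0
        simp only [List.foldl_cons]
        obtain ⟨s1, s2, s3, s4⟩ := ih c cnt0 l0 r0 h0 hl0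
        obtain ⟨f1, f2, f3, f4⟩ := ihc (dfsA t fuel c cnt0 l0 r0).1
          (dfsA t fuel c cnt0 l0 r0).2.1 (dfsA t fuel c cnt0 l0 r0).2.2
          (by omega) (by omega)
        have hx : ((dfsA t fuel c cnt0 l0 r0).1, (dfsA t fuel c cnt0 l0 r0).2.1,
            (dfsA t fuel c cnt0 l0 r0).2.2) = dfsA t fuel c cnt0 l0 r0 := rfl
        rw [hx] at f1 f2 f3 f4
        refine ⟨by omega, by omega, by omega, fun p => ?_⟩
        rcases f4 p with ⟨e1, e2⟩ | hg
        · rcases s4 p with ⟨d1, d2⟩ | hg'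
          · exact Or.inl ⟨by rw [e1, d1], by rw [e2, d2]⟩
          · exact Or.inr ⟨by omega, by omega, by omega⟩
        · exact Or.inr hg
    simp only [dfsA]
    set cs := (PySem.List.pyGet? t u).getD [] with hcs
    set l1 := PySem.List.pySetD l u (cnt + 1) with hl1
    have hlen1 : l1.length = l.length := PySem.List.length_pySetD l u (cnt + 1)
    obtain ⟨f1, f2, f3, f4⟩ := fold cs (cnt + 1) l1 r (by omega) (by rw [hlen1, hlen])
    set F := cs.foldl (fun (acc : Int × List Int × List Int) c =>
        dfsA t fuel c acc.1 acc.2.1 acc.2.2) (cnt + 1, l1, r) with hF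
    refine ⟨show cnt ≤ F.1 + 1 by omega,
      show F.2.1.length = l.length by rw [f2, hlen1],
      show (PySem.List.pySetD F.2.2 u (F.1 + 1)).length = r.length by
        rw [PySem.List.length_pySetD, f3],
      fun p => ?_⟩
    show (F.2.1.getD p 0 = l.getD p 0 ∧
        (PySem.List.pySetD F.2.2 u (F.1 + 1)).getD p 0 = r.getD p 0) ∨
      (2 ≤ F.2.1.getD p 0 ∧
       F.2.1.getD p 0 < (PySem.List.pySetD F.2.2 u (F.1 + 1)).getD p 0 ∧
       (PySem.List.pySetD F.2.2 u (F.1 + 1)).getD p 0 ≤ F.1 + 1)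
    have hcell_l := pySetD_getD l u (cnt + 1) p
    have hcell_r := pySetD_getD F.2.2 u (F.1 + 1) p
    have hlenF : F.2.2.length = l.length := by rw [f3, hlen]
    rw [hlenF] at hcell_r
    by_cases hc : PySem.List.pyIdx? l.length u = some p
    · -- the touched cell
      rw [if_pos hc] at hcell_l hcell_r
      rcases f4 p with ⟨e1, e2⟩ | ⟨g1, g2, g3⟩
      · right
        rw [hcell_r, e1, hl1, hcell_l]
        omega
      · right
        rw [hcell_r]
        omega
    · rw [if_neg hc] at hcell_l hcell_r
      rcases f4 p with ⟨e1, e2⟩ | ⟨g1, g2, g3⟩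
      · left
        rw [hcell_r, e2, e1, hl1, hcell_l]
        exact ⟨rfl, rfl⟩
      · right
        rw [hcell_r]
        omega

theorem set_foldl_add_nodup : ∀ (xs acc : List Int), (acc ++ xs).Nodup →
    xs.foldl PySem.Set.add acc = acc ++ xs := by
  intro xs
  induction xs with
  | nil => intro acc _; simp
  | cons x xs ih =>
    intro acc hnd
    simp only [List.foldl_cons]
    have hx : x ∉ acc := by
      intro hmem
      exact (List.disjoint_of_nodup_append hnd) hmem List.mem_cons_self
    have hadd : PySem.Set.add acc x = acc ++ [x] := by
      unfold PySem.Set.add PySem.Set.contains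
      rw [if_neg (by simp [List.contains_iff_mem]; exact hx)]
    rw [hadd, ih (acc ++ [x]) (by simpa using hnd)]
    simp

theorem set_ofList_nodup (xs : List Int) (h : xs.Nodup) : PySem.Set.ofList xs = xs := by
  unfold PySem.Set.ofList
  have := set_foldl_add_nodup xs [] (by simpa using h)
  simpa using this

theorem nodup_flatMap_each : ∀ (l : List (Int × List Int)),
    (l.flatMap (fun p => p.2)).Nodup → ∀ x ∈ l, x.2.Nodup := by
  intro l
  induction l with
  | nil => intro _ x hx; simp at hx
  | cons a l ih =>
    intro h x hx
    rw [List.flatMap_cons] at h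
    rcases List.mem_cons.mp hx with rfl | hx
    · exact h.of_append_left
    · exact ih h.of_append_right x hx

theorem sumUpdates_append (ups : List (Int × Int × Int)) (lo hi w p : Int) :
    sumUpdates (ups ++ [(lo, hi, w)]) p
      = sumUpdates ups p + (if lo ≤ p ∧ p < hi then w else 0) := by
  unfold sumUpdates
  rw [List.foldl_append]
  simp only [List.foldl_cons, List.foldl_nil]
  split_ifs <;> simp

theorem sumUpdates_neg (ups : List (Int × Int × Int)) (p : Int)
    (h : ∀ u ∈ ups, 0 ≤ u.1) (hp : p < 0) : sumUpdates ups p = 0 := by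
  unfold sumUpdates
  have : ∀ (us : List (Int × Int × Int)) (s : Int), (∀ u ∈ us, 0 ≤ u.1) →
      us.foldl (fun s u => if u.1 ≤ p ∧ p < u.2.1 then s + u.2.2 else s) s = s := by
    intro us
    induction us with
    | nil => intro s _; rfl
    | cons u us ihu =>
      intro s hus
      simp only [List.foldl_cons]
      rw [if_neg (by have := hus u (by simp); omega)]
      exact ihu s (fun v hv => hus v (by simp [hv]))
  exact this ups 0 h

theorem getD_replicate_zero (k p : Nat) : (List.replicate k (0:Int)).getD p 0 = 0 := by
  by_cases h : p < k
  · rw [List.getD_replicate _ h]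
  · rw [List.getD_eq_getElem?_getD, List.getElem?_eq_none (by simp; omega)]
    rfl

theorem pvGsum_replicate (k : Nat) (p : Nat) : pvGsum (List.replicate k (0:Int)) p = 0 := by
  unfold pvGsum
  exact pv_sum_map_zero _ _ (fun j _ => getD_replicate_zero k j)

theorem query_fold (m : Int) (l r : List Int) (hm : 1 ≤ m)
    (hv : ∀ v : Int,
      (PySem.List.pyGetD l v 0 = 0 ∧ PySem.List.pyGetD r v 0 = 0) ∨
      (2 ≤ PySem.List.pyGetD l v 0 ∧ PySem.List.pyGetD l v 0 < PySem.List.pyGetD r v 0 ∧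
        PySem.List.pyGetD r v 0 ≤ m)) :
    ∀ (qs : List (Int × Int × Int)) (data : List Int) (ups : List (Int × Int × Int)) (res : List Int),
      data.length = m.toNat + 1 →
      (∀ u ∈ ups, 0 ≤ u.1 ∧ u.2.1 ≤ m) →
      (∀ p : Nat, p ≤ m.toNat → pvGsum data p = sumUpdates ups (p : Int)) →
      (qs.foldl
        (fun (acc : List Int × List Int) q =>
          if q.1 = 1 then
            (acc.1, acc.2 ++ [bitGetSum acc.1 (PySem.List.pyGetD r q.2.1 0 - 1)])
          else
            (bitAdd m (bitAdd m acc.1 (PySem.List.pyGetD l q.2.1 0) q.2.2)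
               (PySem.List.pyGetD r q.2.1 0) (-q.2.2), acc.2))
        (data, res)).2
      = (qs.foldl
        (fun (acc : List (Int × Int × Int) × List Int) q =>
          if q.1 = 1 then
            (acc.1, acc.2 ++ [sumUpdates acc.1 (PySem.List.pyGetD r q.2.1 0 - 1)])
          else
            (acc.1 ++ [(PySem.List.pyGetD l q.2.1 0, PySem.List.pyGetD r q.2.1 0, q.2.2)], acc.2))
        (ups, res)).2 := by
  intro qs
  induction qs with
  | nil => intro data ups res _ _ _; rfl
  | cons q qs ih =>
    intro data ups res hlen hbnd hrel
    simp only [List.foldl_cons]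
    by_cases hq : q.1 = 1
    · rw [if_pos hq, if_pos hq]
      have helem : bitGetSum data (PySem.List.pyGetD r q.2.1 0 - 1)
          = sumUpdates ups (PySem.List.pyGetD r q.2.1 0 - 1) := by
        rcases hv q.2.1 with ⟨h1, h2⟩ | ⟨h1, h2, h3⟩
        · rw [h2]
          have hA : bitGetSum data (0 - 1) = 0 := rfl
          rw [hA, sumUpdates_neg ups _ (fun u hu => (hbnd u hu).1) (by norm_num)]
        · set p := PySem.List.pyGetD r q.2.1 0 - 1 with hp
          have hp1 : 1 ≤ p := by omega
          have hA : bitGetSum data p = pvGsum data p.toNat := by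
            unfold bitGetSum
            rw [bitGetSumLoop_eq data p.toNat p 0 le_rfl]
            ring
          rw [hA, hrel p.toNat (by omega)]
          congr 1
          omega
      rw [helem]
      exact ih data ups _ hlen hbnd hrel
    · rw [if_neg hq, if_neg hq]
      rcases hv q.2.1 with ⟨h1, h2⟩ | ⟨h1, h2, h3⟩
      · rw [h1, h2]
        have hA : bitAdd m (bitAdd m data 0 q.2.2) 0 (-q.2.2) = data := by
          unfold bitAdd; simp
        rw [hA]
        apply ih
        · exact hlen
        · intro u hu
          rcases List.mem_append.mp hu with hu | hu
          · exact hbnd u hu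
          · simp at hu; subst hu; exact ⟨le_refl 0, show (0:Int) ≤ m by omega⟩
        · intro p hp
          rw [sumUpdates_append, if_neg (by push_neg; intro h; omega)]
          rw [hrel p hp]; ring
      · generalize hlv : PySem.List.pyGetD l q.2.1 0 = lv at h1 h2 ⊢
        generalize hrv : PySem.List.pyGetD r q.2.1 0 = rv at h2 h3 ⊢
        obtain ⟨hL1, hL2⟩ := bitAdd_spec m data lv q.2.2 hm (by omega) (by omega) hlen
        obtain ⟨hR1, hR2⟩ := bitAdd_spec m (bitAdd m data lv q.2.2) rv (-q.2.2) hm (by omega)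
          (by omega) (by rw [hL1, hlen])
        apply ih
        · rw [hR1, hL1, hlen]
        · intro u hu
          rcases List.mem_append.mp hu with hu | hu
          · exact hbnd u hu
          · simp at hu; subst hu; constructor <;> omega
        · intro p hp
          rw [pvGsum_add m _ rv (-q.2.2) hm (by omega) (by omega) (by rw [hL1, hlen]) p hp]
          rw [pvGsum_add m data lv q.2.2 hm (by omega) (by omega) hlen p hp]
          rw [sumUpdates_append, hrel p hp]
          have hc1 : (1 ≤ lv ∧ lv ≤ (p:Int)) ↔ lv ≤ (p:Int) := by omega
          have hc2 : (1 ≤ rv ∧ rv ≤ (p:Int)) ↔ rv ≤ (p:Int) := by omega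
          rw [if_congr hc1 rfl rfl, if_congr hc2 rfl rfl]
          by_cases hA : lv ≤ (p:Int)
          · by_cases hB : rv ≤ (p:Int)
            · rw [if_pos hA, if_pos hB, if_neg (by omega)]; ring
            · rw [if_pos hA, if_neg hB, if_pos (by constructor <;> omega)]; ring
          · rw [if_neg hA, if_neg (by omega), if_neg (by push_neg; intro h; omega)]; ring

-- when node 0 is childless, both tours touch only node 0, whatever the two trees hold elsewhere
theorem dfs_root_leaf (tA tB : List (List Int)) (hA : tA.head? = some [])
    (hB : tB.head? = some []) (fuel : Nat) (cnt : Int) (l r : List Int) :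
    dfsA tA (fuel + 1) 0 cnt l r =
      ((tourE tB (fuel + 1) 0 cnt).1, applyEv l (tourE tB (fuel + 1) 0 cnt).2.1,
        applyEv r (tourE tB (fuel + 1) 0 cnt).2.2) := by
  simp only [dfsA, tourE]
  have hgA : PySem.List.pyGet? tA 0 = some [] := by
    cases tA with
    | nil => simp at hA
    | cons x t => simp at hA; rw [PySem.List.pyGet?_zero_cons, hA]
  have hgB : PySem.List.pyGet? tB 0 = some [] := by
    cases tB with
    | nil => simp at hB
    | cons x t => simp at hB; rw [PySem.List.pyGet?_zero_cons, hB]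
  rw [hgA, hgB]
  rfl

-- ===== VERDICT (by name: the statement is the Claim_ definition above) =====
theorem process_tree_operations_spec : Claim_equal_process_tree_operations := by
  intro n nodes queries hdom hpre
  obtain ⟨hn, hne, hq, hcase⟩ := hpre
  unfold Spec_process_tree_operations
  simp only [process_tree_operations, process_tree_operations_alt]
  have hkey : dfsA (nodes.map (fun p => PySem.Set.ofList p.2)) (n.toNat + nodes.length + 2) 0 1
        (List.replicate n.toNat 0) (List.replicate n.toNat 0)
      = ((tourE (nodes.map (fun p => p.2)) (n.toNat + nodes.length + 2) 0 1).1,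
         applyEv (List.replicate n.toNat 0)
           (tourE (nodes.map (fun p => p.2)) (n.toNat + nodes.length + 2) 0 1).2.1,
         applyEv (List.replicate n.toNat 0)
           (tourE (nodes.map (fun p => p.2)) (n.toNat + nodes.length + 2) 0 1).2.2) := by
    rcases hcase with hR | ⟨hlen, hch, hnd⟩
    · cases nodes with
      | nil => exact absurd rfl hne
      | cons p rest =>
        simp only [List.headI_cons] at hR
        exact dfs_root_leaf _ _ (by simp [hR]) (by simp [hR])
          (n.toNat + (p :: rest).length + 1) 1 _ _
    · have htree : nodes.map (fun p => PySem.Set.ofList p.2) = nodes.map (fun p => p.2) :=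
        List.map_congr_left (fun p hp => by
          rw [set_ofList_nodup p.2 (nodup_flatMap_each nodes hnd p hp)])
      rw [htree]
      exact dfsA_events _ _ 0 1 _ _
  obtain ⟨hm1, hl1, hr1, hcells⟩ := dfsA_inv (nodes.map (fun p => PySem.Set.ofList p.2))
    (n.toNat + nodes.length + 2) 0 1 (List.replicate n.toNat 0) (List.replicate n.toNat 0)
    (by norm_num) rfl
  set d := dfsA (nodes.map (fun p => PySem.Set.ofList p.2)) (n.toNat + nodes.length + 2) 0 1
    (List.replicate n.toNat 0) (List.replicate n.toNat 0) with hd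
  set e := tourE (nodes.map (fun p => p.2)) (n.toNat + nodes.length + 2) 0 1 with he
  have hd21 : d.2.1 = applyEv (List.replicate n.toNat 0) e.2.1 := by rw [hkey]
  have hd22 : d.2.2 = applyEv (List.replicate n.toNat 0) e.2.2 := by rw [hkey]
  rw [← hd21, ← hd22]
  have hv : ∀ v : Int,
      (PySem.List.pyGetD d.2.1 v 0 = 0 ∧ PySem.List.pyGetD d.2.2 v 0 = 0) ∨
      (2 ≤ PySem.List.pyGetD d.2.1 v 0 ∧
       PySem.List.pyGetD d.2.1 v 0 < PySem.List.pyGetD d.2.2 v 0 ∧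
       PySem.List.pyGetD d.2.2 v 0 ≤ d.1) := by
    intro v
    have hsame : PySem.List.pyIdx? d.2.2.length v = PySem.List.pyIdx? d.2.1.length v := by
      rw [hl1, hr1]
    cases hcell : PySem.List.pyIdx? d.2.1.length v with
    | none =>
      rw [pyGetD_cell_none _ _ hcell, pyGetD_cell_none _ _ (by rw [hsame, hcell])]
      exact Or.inl ⟨rfl, rfl⟩
    | some qq =>
      rw [pyGetD_cell_some _ _ _ hcell, pyGetD_cell_some _ _ _ (by rw [hsame, hcell])]
      rcases hcells qq with ⟨e1, e2⟩ | hgood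
      · rw [e1, e2, getD_replicate_zero]
        exact Or.inl ⟨rfl, rfl⟩
      · exact Or.inr hgood
  exact query_fold d.1 d.2.1 d.2.2 (by omega) hv queries
    (List.replicate (d.1 + 1).toNat 0) [] []
    (by rw [List.length_replicate]; omega)
    (by intro u hu; simp at hu)
    (by
      intro p hp
      rw [pvGsum_replicate]
      rfl)
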